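-- pv_equiv track=rewrite | github.com/SjJ1017/tokenizer-intrinsic-evals | tokenizer_analysis/metrics/morphological.py | _validate_boundaries_fast
-- ===== SOURCE A (Python) =====
-- from typing import Dict, List, Any, Optional
--
-- def _validate_boundaries_fast(boundaries: List[tuple], word_length: int) -> bool:
--     """
--     Fast validation with minimal logging for performance.
--
--     Args:
--         boundaries: List of (start, end) tuples
--         word_length: Length of the original word
--
--     Returns:
--         True if boundaries are valid, False otherwise
--     """
--     if not boundaries:
--         return False
--
--     prev_end = 0
--     for start, end in boundaries:
--         # Quick bounds and overlap check
--         if start < 0 or end > word_length or start >= end or start < prev_end: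
--             return False
--         prev_end = end
--
--     return True
-- ===== SOURCE B (Python) =====
-- def _validate_boundaries_fast(boundaries, word_length):
--     if not boundaries:
--         return False
--     well_formed = all(0 <= start < end <= word_length for start, end in boundaries)
--     ordered = all(a[1] <= b[0] for a, b in zip(boundaries, boundaries[1:]))
--     return well_formed and ordered
-- ===== Notes on version B (the rewrite author's own statement) =====
-- stated objective: simpler
-- what changed: Replaces the single fused loop with a running prev_end accumulator by two stateless declarative passes: one all() checking each tuple is well-formed and in-bounds, and one all() over consecutive pairs checking non-overlap/order.
import Mathlib
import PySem

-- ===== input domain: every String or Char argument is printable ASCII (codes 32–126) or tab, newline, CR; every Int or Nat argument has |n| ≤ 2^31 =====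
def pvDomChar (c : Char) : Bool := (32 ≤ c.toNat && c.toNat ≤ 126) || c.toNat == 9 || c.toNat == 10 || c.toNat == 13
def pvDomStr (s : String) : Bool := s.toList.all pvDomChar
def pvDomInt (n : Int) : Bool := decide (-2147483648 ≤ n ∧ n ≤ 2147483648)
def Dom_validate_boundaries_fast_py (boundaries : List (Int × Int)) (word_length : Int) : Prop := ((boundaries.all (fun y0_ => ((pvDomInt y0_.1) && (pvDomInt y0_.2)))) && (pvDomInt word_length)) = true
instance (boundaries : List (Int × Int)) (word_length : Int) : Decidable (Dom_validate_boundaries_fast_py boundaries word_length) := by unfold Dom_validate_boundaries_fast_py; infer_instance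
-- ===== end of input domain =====

-- B replaces A's fused loop with prev_end accumulator by two stateless all()-passes
-- (per-tuple well-formedness, then consecutive-pair ordering); objective: simpler.


-- ===== PORT A =====
-- the for-loop over (start, end) with accumulator prev_end and early return False
def pvALoop (word_length : Int) : List (Int × Int) → Int → Bool
  | [], _ => true
  | (start, e) :: rest, prev_end =>
    if start < 0 || e > word_length || start ≥ e || start < prev_end then false
    else pvALoop word_length rest e

def validate_boundaries_fast_py (boundaries : List (Int × Int)) (word_length : Int) : Bool :=
  if boundaries.isEmpty then false
  else pvALoop word_length boundaries 0

-- ===== PORT B =====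
-- boundaries[1:] ported as List.drop 1; zip as List.zip
def validate_boundaries_fast_py_alt (boundaries : List (Int × Int)) (word_length : Int) : Bool :=
  if boundaries.isEmpty then false
  else
    let well_formed := boundaries.all (fun p => decide (0 ≤ p.1) && decide (p.1 < p.2) && decide (p.2 ≤ word_length))
    let ordered := (boundaries.zip (boundaries.drop 1)).all (fun q => decide (q.1.2 ≤ q.2.1))
    well_formed && ordered

-- ===== PRECONDITION & SPEC =====
def Spec_validate_boundaries_fast_py (boundaries : List (Int × Int)) (word_length : Int) (out : Bool) : Prop := out = validate_boundaries_fast_py_alt boundaries word_length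
instance (boundaries : List (Int × Int)) (word_length : Int) (out : Bool) : Decidable (Spec_validate_boundaries_fast_py boundaries word_length out) := by unfold Spec_validate_boundaries_fast_py; infer_instance

-- ===== CLAIM (what is proved, stated in full; the proofs are below) =====
def Claim_equal_validate_boundaries_fast_py : Prop := ∀ (boundaries : List (Int × Int)) (word_length : Int), Dom_validate_boundaries_fast_py boundaries word_length → Spec_validate_boundaries_fast_py boundaries word_length (validate_boundaries_fast_py boundaries word_length)

-- ===== LEMMAS AND PROOFS =====

-- head-start check relative to the accumulator
def pvHeadOk (prev : Int) : List (Int × Int) → Bool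
  | [] => true
  | (s, _) :: _ => decide (prev ≤ s)

theorem pvALoop_char (word_length : Int) (bs : List (Int × Int)) :
    ∀ prev : Int, 0 ≤ prev →
      pvALoop word_length bs prev =
        (bs.all (fun p => decide (0 ≤ p.1) && decide (p.1 < p.2) && decide (p.2 ≤ word_length)) &&
         pvHeadOk prev bs &&
         (bs.zip (bs.drop 1)).all (fun q => decide (q.1.2 ≤ q.2.1))) := by
  induction bs with
  | nil => intro prev _; simp [pvALoop, pvHeadOk]
  | cons hd tl ih =>
    intro prev hprev
    obtain ⟨s, e⟩ := hd
    by_cases hbad : s < 0 ∨ e > word_length ∨ s ≥ e ∨ s < prev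
    · have : pvALoop word_length ((s, e) :: tl) prev = false := by
        simp only [pvALoop]
        rw [if_pos]
        simp only [Bool.or_eq_true, decide_eq_true_eq]
        tauto
      rw [this]
      cases tl with
      | nil => simp [pvHeadOk]; omega
      | cons b r => simp [pvHeadOk]; omega
    · push Not at hbad
      obtain ⟨h1, h2, h3, h4⟩ := hbad
      have hstep : pvALoop word_length ((s, e) :: tl) prev = pvALoop word_length tl e := by
        simp only [pvALoop]
        rw [if_neg]
        simp only [Bool.or_eq_true, decide_eq_true_eq]
        omega
      rw [hstep, ih e (by omega)]
      cases tl with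
      | nil => simp [pvHeadOk]; omega
      | cons b r =>
        obtain ⟨s2, e2⟩ := b
        simp [pvHeadOk, h1, h2, h3, h4, Bool.and_assoc]

-- ===== VERDICT (by name: the statement is the Claim_ definition above) =====
theorem validate_boundaries_fast_py_spec : Claim_equal_validate_boundaries_fast_py := by
  intro boundaries word_length _
  unfold Spec_validate_boundaries_fast_py validate_boundaries_fast_py validate_boundaries_fast_py_alt
  cases boundaries with
  | nil => simp
  | cons hd tl =>
    obtain ⟨s, e⟩ := hd
    simp only [List.isEmpty_cons, if_neg Bool.false_ne_true]
    rw [pvALoop_char word_length ((s, e) :: tl) 0 (by omega)]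
    by_cases h : (0:Int) ≤ s <;> simp [pvHeadOk, h, Bool.and_assoc]
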